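-- pv_equiv track=rewrite | github.com/djotaku/adventofcode | 2015/Day_15/Python/part_1.py | brute_force_cookie_score
-- ===== SOURCE A (Python) =====
-- from itertools import permutations, combinations_with_replacement
--
-- def ingredient_score(teaspoon_list, ingredient_list):
--     combined_list = zip(teaspoon_list, ingredient_list)
--     total_ingredients = []
--     for multiplication_tuple in combined_list:
--         temp_list = [
--             int(item) * multiplication_tuple[0] for item in multiplication_tuple[1]
--         ]
--         total_ingredients.append(temp_list)
--     properties = zip(*total_ingredients)
--     final_score = 1
--     property_count = 1  # this is to ignore calories for part 1
--     for cookie_property in properties: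
--         if sum(cookie_property) > 0:
--             final_score *= sum(cookie_property)
--         property_count += 1
--         if property_count == 5:
--             break
--     return final_score
--
-- def brute_force_cookie_score(ingredient_list):
--     ingredient_combos = [
--         element
--         for element in permutations(
--             range(1, 100), len(ingredient_list)
--         )
--         if sum(element) == 100
--     ]
--     score = 0
--     for ingredient_combination in ingredient_combos:
--         combo_score = ingredient_score(ingredient_combination, ingredient_list)
--         if combo_score > score:
--             score = combo_score
--     return score
-- ===== SOURCE B (Python) =====
-- def brute_force_cookie_score(ingredient_list):
--     # Pruned recursive enumeration: build only ordered tuples of distinct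
--     # teaspoon amounts from 1..99 whose running sum stays <= 100 (last amount
--     # taken directly as the leftover), instead of filtering all permutations.
--     lens = [len(ing) for ing in ingredient_list]
--     nprops = min(4, min(lens)) if lens else 0
--
--     def score(ts):
--         s = 1
--         for j in range(nprops):
--             p = sum(t * ing[j] for t, ing in zip(ts, ingredient_list))
--             if p > 0:
--                 s *= p
--         return s
--
--     def pruned(pool, k, r):
--         if k == 0:
--             return [[]] if r == 0 else []
--         if k == 1:
--             return [[r]] if r in pool else []
--         out = []
--         for i, x in enumerate(pool):
--             if x <= r:
--                 for rest in pruned(pool[:i] + pool[i + 1:], k - 1, r - x):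
--                     out.append([x] + rest)
--         return out
--
--     best = 0
--     for ts in pruned(list(range(1, 100)), len(ingredient_list), 100):
--         s = score(ts)
--         if s > best:
--             best = s
--     return best
-- ===== Notes on version B (the rewrite author's own statement) =====
-- stated objective: faster
-- what changed: B replaces A's generate-all-permutations-of-range(1,100)-then-filter-by-sum==100 with a pruned recursive enumeration that only extends partial tuples whose running sum stays at most 100 and takes the final amount directly as the leftover remainder.
import Mathlib
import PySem

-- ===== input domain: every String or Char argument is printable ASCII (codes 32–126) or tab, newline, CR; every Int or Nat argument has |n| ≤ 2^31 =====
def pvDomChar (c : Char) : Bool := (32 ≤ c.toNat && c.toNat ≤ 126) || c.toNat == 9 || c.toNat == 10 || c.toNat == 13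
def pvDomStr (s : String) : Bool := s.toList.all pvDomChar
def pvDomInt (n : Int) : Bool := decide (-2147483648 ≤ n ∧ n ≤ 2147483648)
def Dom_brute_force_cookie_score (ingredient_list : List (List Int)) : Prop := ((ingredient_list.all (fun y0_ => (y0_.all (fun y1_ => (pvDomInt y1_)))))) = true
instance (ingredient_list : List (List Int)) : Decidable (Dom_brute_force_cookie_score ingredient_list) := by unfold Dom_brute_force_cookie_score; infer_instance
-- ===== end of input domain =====

-- B replaces A's "filter all permutations of range(1,100) by sum == 100" with a
-- pruned recursive enumeration that only extends partial tuples whose running sum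
-- stays ≤ 100 (the last amount is taken directly as the leftover); the timing
-- run measured B faster at the larger sizes.

-- ===== PORT A =====
-- itertools.permutations(pool, n): all n-tuples of distinct positions, in order
def permsA (pool : List Int) : Nat → List (List Int)
  | 0 => [[]]
  | n + 1 => pool.flatMap (fun x => (permsA (pool.erase x) n).map (x :: ·))

-- the 'for cookie_property in properties' loop with its property_count == 5 break
def isLoop : List (List Int) → Int → Int → Int
  | [], s, _ => s
  | p :: rest, s, c =>
    let s' := if p.sum > 0 then s * p.sum else s
    if c + 1 = 5 then s' else isLoop rest s' (c + 1)

-- needed for pyZipN's termination; the port cites it in decreasing_by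
theorem pvSumTailLt (ls : List (List Int)) (h1 : ls ≠ []) (h2 : ls.all (fun l => !l.isEmpty) = true) :
    ((ls.map (fun l => l.tail)).map List.length).sum < (ls.map List.length).sum := by
  match ls with
  | [] => exact absurd rfl h1
  | a :: t =>
    simp only [List.all_cons, Bool.and_eq_true] at h2
    have ha : a ≠ [] := by simpa [List.isEmpty_iff] using h2.1
    have h3 : ((t.map (fun l => l.tail)).map List.length).sum ≤ (t.map List.length).sum := by
      rw [List.map_map]
      exact List.sum_le_sum (fun l _ => by simpa [List.length_tail] using Nat.sub_le _ _)
    have h4 : a.tail.length < a.length := by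
      have := List.length_pos_iff.mpr ha
      simp [List.length_tail]; omega
    simp only [List.map_cons, List.sum_cons]
    omega

-- zip(*rows): transpose truncated to the shortest row (zip() of no args is empty)
def pyZipN (ls : List (List Int)) : List (List Int) :=
  if h : ls ≠ [] ∧ ls.all (fun l => !l.isEmpty) = true then
    (ls.map (fun l => l.headD 0)) :: pyZipN (ls.map (fun l => l.tail))
  else []
termination_by (ls.map List.length).sum
decreasing_by simpa using pvSumTailLt ls h.1 h.2

def ingredient_score (teaspoon_list : List Int) (ingredient_list : List (List Int)) : Int :=
  let total_ingredients := (teaspoon_list.zip ingredient_list).map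
    (fun mt => mt.2.map (fun item => item * mt.1))
  isLoop (pyZipN total_ingredients) 1 1

def brute_force_cookie_score (ingredient_list : List (List Int)) : Int :=
  let combos := (permsA (PySem.List.pyRange 1 100 1) ingredient_list.length).filter
    (fun e => decide (e.sum = 100))
  combos.foldl (fun score c =>
    let combo_score := ingredient_score c ingredient_list
    if combo_score > score then combo_score else score) 0

-- ===== PORT B =====
def pvMinNat : List Nat → Nat
  | [] => 0
  | h :: t => t.foldl Nat.min h

def pvPropSum (ts : List Int) (il : List (List Int)) (j : Nat) : Int :=
  (ts.zip il).foldl (fun a ti => a + ti.1 * ti.2.getD j 0) 0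

def pvScoreB (il : List (List Int)) (np : Nat) (ts : List Int) : Int :=
  (List.range np).foldl (fun s j =>
    let p := pvPropSum ts il j
    if p > 0 then s * p else s) 1

def pvPruned (pool : List Int) : Nat → Int → List (List Int)
  | 0, r => if r = 0 then [[]] else []
  | 1, r => if r ∈ pool then [[r]] else []
  | k + 2, r => pool.flatMap (fun x =>
      if x ≤ r then (pvPruned (pool.erase x) (k + 1) (r - x)).map (x :: ·) else [])

def brute_force_cookie_score_alt (ingredient_list : List (List Int)) : Int :=
  let lens := ingredient_list.map List.length
  let np := if lens.isEmpty then 0 else Nat.min 4 (pvMinNat lens)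
  (pvPruned (PySem.List.pyRange 1 100 1) ingredient_list.length 100).foldl
    (fun best ts =>
      let s := pvScoreB ingredient_list np ts
      if s > best then s else best) 0

-- ===== PRECONDITION & SPEC =====
def Spec_brute_force_cookie_score (ingredient_list : List (List Int)) (out : Int) : Prop := out = brute_force_cookie_score_alt ingredient_list
instance (ingredient_list : List (List Int)) (out : Int) : Decidable (Spec_brute_force_cookie_score ingredient_list out) := by unfold Spec_brute_force_cookie_score; infer_instance

-- ===== CLAIM (what is proved, stated in full; the proofs are below) =====
def Claim_equal_brute_force_cookie_score : Prop := ∀ (ingredient_list : List (List Int)), Dom_brute_force_cookie_score ingredient_list → Spec_brute_force_cookie_score ingredient_list (brute_force_cookie_score ingredient_list)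

-- ===== LEMMAS AND PROOFS =====

theorem mem_permsA {n : Nat} {pool : List Int} {t : List Int} (h : t ∈ permsA pool n) :
    t.length = n ∧ ∀ y ∈ t, y ∈ pool := by
  induction n generalizing pool t with
  | zero => simp [permsA] at h; simp [h]
  | succ m ih =>
    simp only [permsA, List.mem_flatMap, List.mem_map] at h
    obtain ⟨x, hx, u, hu, rfl⟩ := h
    obtain ⟨hl, hm⟩ := ih hu
    refine ⟨by simp [hl], ?_⟩
    intro y hy
    rcases List.mem_cons.mp hy with rfl | hy
    · exact hx
    · exact List.mem_of_mem_erase (hm y hy)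

theorem flatMap_if_eq_single {pool : List Int} {r : Int} (hnd : pool.Nodup) :
    pool.flatMap (fun x => if x = r then [[r]] else ([] : List (List Int)))
      = if r ∈ pool then [[r]] else [] := by
  induction pool with
  | nil => simp
  | cons a t ih =>
    simp only [List.nodup_cons] at hnd
    by_cases ha : a = r
    · subst ha
      have : t.flatMap (fun x => if x = a then [[a]] else ([] : List (List Int))) = [] := by
        rw [List.flatMap_eq_nil_iff]
        intro x hx
        have : x ≠ a := fun h => hnd.1 (h ▸ hx)
        simp [this]
      simp [this]
    · have := ih hnd.2
      have hiff : (r ∈ a :: t) ↔ r ∈ t :=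
        ⟨fun h => (List.mem_cons.mp h).resolve_left (fun e => ha e.symm),
         fun h => List.mem_cons_of_mem _ h⟩
      rw [List.flatMap_cons, if_neg ha, List.nil_append, this, if_congr hiff rfl rfl]

theorem filter_permsA (n : Nat) (pool : List Int) (r : Int) (hnd : pool.Nodup)
    (hpos : ∀ y ∈ pool, 0 < y) :
    (permsA pool n).filter (fun e => decide (e.sum = r)) = pvPruned pool n r := by
  induction n generalizing pool r with
  | zero =>
    simp only [permsA, pvPruned]
    by_cases h : r = 0
    · subst h; simp
    · have h' : ¬ ((0 : Int) = r) := fun hh => h hh.symm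
      simp [List.filter_cons, h, h']
  | succ m ih =>
    rw [permsA, List.filter_flatMap]
    have step : ∀ x, (List.filter (fun e => decide (e.sum = r))
        ((permsA (pool.erase x) m).map (x :: ·)))
        = ((permsA (pool.erase x) m).filter (fun e => decide (e.sum = r - x))).map (x :: ·) := by
      intro x
      rw [List.filter_map]
      congr 1
      apply List.filter_congr
      intro t _
      simp only [Function.comp, List.sum_cons, decide_eq_decide]
      omega
    match m, step, ih with
    | 0, step, _ =>
      show pool.flatMap _ = pvPruned pool 1 r
      have : ∀ x ∈ pool, (List.filter (fun e => decide (e.sum = r))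
          ((permsA (pool.erase x) 0).map (x :: ·)))
          = if x = r then [[r]] else [] := by
        intro x hx
        rw [step x]
        simp only [permsA]
        by_cases hxr : x = r
        · subst hxr; simp [List.filter]
        · have h0 : ¬ ((0 : Int) = r - x) := fun hh => hxr (by omega)
          simp [List.filter_cons, h0, hxr]
      rw [List.flatMap_congr this, pvPruned]
      exact flatMap_if_eq_single hnd
    | k + 1, step, ih =>
      show pool.flatMap _ = pvPruned pool (k + 2) r
      rw [pvPruned]
      apply List.flatMap_congr
      intro x hx
      rw [step x]
      by_cases hxr : x ≤ r
      · rw [if_pos hxr,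
          ih (pool.erase x) (r - x) (hnd.erase x)
            (fun y hy => hpos y (List.mem_of_mem_erase hy))]
      · rw [if_neg hxr]
        have : (permsA (pool.erase x) (k + 1)).filter (fun e => decide (e.sum = r - x)) = [] := by
          rw [List.filter_eq_nil_iff]
          intro t ht
          obtain ⟨_, hmem⟩ := mem_permsA ht
          have hsum : 0 ≤ t.sum :=
            List.sum_nonneg (fun y hy =>
              le_of_lt (hpos y (List.mem_of_mem_erase (hmem y hy))))
          have hx0 : 0 < x := hpos x hx
          simp only [decide_eq_true_eq]
          omega
        simp [this]

-- characterisation of the transpose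
theorem pvMinNat_eq_zero {l : List Nat} {h : Nat} (hz : h = 0 ∨ ∃ y ∈ l, y = 0) :
    l.foldl Nat.min h = 0 := by
  induction l generalizing h with
  | nil =>
    rcases hz with rfl | ⟨y, hy, _⟩
    · rfl
    · cases hy
  | cons a t ih =>
    simp only [List.foldl_cons]
    rcases hz with rfl | ⟨y, hy, rfl⟩
    · exact ih (Or.inl (by simp [Nat.min_def]))
    · rcases List.mem_cons.mp hy with rfl | hy
      · exact ih (Or.inl (by simp [Nat.min_def]))
      · exact ih (Or.inr ⟨0, hy, rfl⟩)

theorem pvMinNat_pred {t : List Nat} {h : Nat} (hh : 0 < h) (ht : ∀ y ∈ t, 0 < y) :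
    ((t.map (fun y => y - 1)).foldl Nat.min (h - 1)) + 1 = t.foldl Nat.min h := by
  induction t generalizing h with
  | nil => simp only [List.map_nil, List.foldl_nil]; omega
  | cons a s ih =>
    have ha : 0 < a := ht a (by simp)
    have hmin : Nat.min (h - 1) (a - 1) = Nat.min h a - 1 := by
      simp only [Nat.min_def]
      split <;> split <;> omega
    simp only [List.map_cons, List.foldl_cons, hmin]
    exact ih (Nat.lt_min.mpr ⟨hh, ha⟩) (fun y hy => ht y (by simp [hy]))

def pvMinL (rows : List (List Int)) : Nat := pvMinNat (rows.map List.length)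

theorem pyZipN_eq (rows : List (List Int)) :
    pyZipN rows = (List.range (pvMinL rows)).map (fun j => rows.map (fun rw => rw.getD j 0)) := by
  generalize hN : (rows.map List.length).sum = N
  induction N using Nat.strong_induction_on generalizing rows with
  | _ N ih =>
  rw [pyZipN.eq_def]
  by_cases h : rows ≠ [] ∧ (rows.all fun l => !l.isEmpty) = true
  · obtain ⟨hne, hall⟩ := h
    have hpos : ∀ l ∈ rows, 0 < l.length := by
      intro l hl
      have := (List.all_eq_true.mp hall) l hl
      simp only [Bool.not_eq_eq_eq_not, Bool.not_true, List.isEmpty_eq_false_iff] at this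
      exact List.length_pos_iff.mpr this
    have hm : pvMinL rows = pvMinL (rows.map (fun l => l.tail)) + 1 := by
      match rows, hne, hpos with
      | a :: t, _, hpos =>
        have ha : 0 < a.length := hpos a (by simp)
        have hth : ∀ y ∈ t.map List.length, 0 < y := by
          intro y hy
          obtain ⟨l, hl, rfl⟩ := List.mem_map.mp hy
          exact hpos l (by simp [hl])
        have h1 : (t.map (fun l => l.tail)).map List.length
            = (t.map List.length).map (fun y => y - 1) := by
          simp only [List.map_map]
          exact List.map_congr_left (fun l _ => by simp [List.length_tail])
        simp only [pvMinL, pvMinNat, List.map_cons, h1, List.length_tail]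
        exact (pvMinNat_pred ha hth).symm
    have hlt : ((rows.map (fun l => l.tail)).map List.length).sum < N :=
      hN ▸ pvSumTailLt rows hne hall
    rw [dif_pos ⟨hne, hall⟩, ih _ hlt _ rfl, hm, List.range_succ_eq_map, List.map_cons]
    congr 1
    · exact List.map_congr_left (fun l _ => by cases l <;> simp [List.getD])
    · rw [List.map_map]
      apply List.map_congr_left
      intro j _
      simp only [Function.comp, List.map_map]
      exact List.map_congr_left (fun l _ => by cases l <;> simp [List.getD, Nat.succ_eq_add_one])
  · rw [dif_neg h]
    have hz : pvMinL rows = 0 := by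
      rcases not_and_or.mp h with h1 | h2
      · have : rows = [] := not_not.mp h1
        subst this; rfl
      · have hex : ∃ l ∈ rows, l.length = 0 := by
          by_contra hc
          push_neg at hc
          refine h2 (List.all_eq_true.mpr (fun l hl => ?_))
          have := hc l hl
          simp only [Bool.not_eq_eq_eq_not, Bool.not_true, List.isEmpty_eq_false_iff]
          exact fun e => this (by simp [e])
        obtain ⟨l, hl, h0⟩ := hex
        match rows, hl with
        | a :: t, hl =>
          rcases List.mem_cons.mp hl with rfl | hmem
          · exact pvMinNat_eq_zero (Or.inl h0)
          · exact pvMinNat_eq_zero (Or.inr ⟨l.length, List.mem_map_of_mem hmem, h0⟩)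
    simp [hz]

theorem isLoop_take (ps : List (List Int)) : ∀ (c s : Int), 1 ≤ c → c ≤ 4 →
    isLoop ps s c = (ps.take (5 - c).toNat).foldl
      (fun s p => if p.sum > 0 then s * p.sum else s) s := by
  induction ps with
  | nil => intro c s _ _; simp [isLoop]
  | cons p rest ih =>
    intro c s h1 h4
    simp only [isLoop]
    by_cases hc : c + 1 = 5
    · rw [if_pos hc]
      have h5 : (5 - c).toNat = 1 := by omega
      simp [h5]
    · rw [if_neg hc]
      have h5 : (5 - c).toNat = (5 - (c + 1)).toNat + 1 := by omega
      rw [h5, List.take_succ_cons, List.foldl_cons]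
      exact ih (c + 1) _ (by omega) (by omega)

theorem getD_map_mul (l : List Int) (t : Int) (j : Nat) :
    (l.map (fun item => item * t)).getD j 0 = l.getD j 0 * t := by
  simp only [List.getD, List.getElem?_map]
  cases l[j]? <;> simp

theorem score_eq (ts : List Int) (il : List (List Int)) (hlen : ts.length = il.length) :
    ingredient_score ts il
      = pvScoreB il (if (il.map List.length).isEmpty then 0
          else Nat.min 4 (pvMinNat (il.map List.length))) ts := by
  unfold ingredient_score pvScoreB
  set rows := (ts.zip il).map (fun mt => mt.2.map (fun item => item * mt.1)) with hrows
  have hsnd : (ts.zip il).map Prod.snd = il := List.map_snd_zip (le_of_eq hlen.symm)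
  have hlens : rows.map List.length = il.map List.length := by
    rw [hrows, List.map_map]
    conv_rhs => rw [← hsnd, List.map_map]
    exact List.map_congr_left (fun mt _ => by simp [Function.comp])
  have hnp : (if (il.map List.length).isEmpty then 0
      else Nat.min 4 (pvMinNat (il.map List.length))) = Nat.min 4 (pvMinL rows) := by
    rw [pvMinL, hlens]
    generalize il.map List.length = L
    cases L with
    | nil => simp [pvMinNat]
    | cons a t => simp
  rw [hnp]
  have hloop : isLoop (pyZipN rows) 1 1 = ((pyZipN rows).take 4).foldl
      (fun s p => if p.sum > 0 then s * p.sum else s) 1 := by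
    have h := isLoop_take (pyZipN rows) 1 1 (by norm_num) (by norm_num)
    norm_num at h
    exact h
  rw [hloop, pyZipN_eq, ← List.map_take, List.take_range, List.foldl_map]
  apply PySem.List.foldl_congr_mem'
  intro j _ acc
  have hsum : (rows.map (fun rw => rw.getD j 0)).sum = pvPropSum ts il j := by
    rw [pvPropSum, PySem.List.foldl_add, zero_add, hrows, List.map_map]
    apply congrArg List.sum
    apply List.map_congr_left
    intro mt _
    simp only [Function.comp]
    rw [getD_map_mul]
    ring
  rw [hsum]

-- ===== VERDICT (by name: the statement is the Claim_ definition above) =====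
theorem brute_force_cookie_score_spec : Claim_equal_brute_force_cookie_score := by
  intro il _
  unfold Spec_brute_force_cookie_score brute_force_cookie_score brute_force_cookie_score_alt
  have hnd : (PySem.List.pyRange 1 100 1).Nodup := PySem.List.nodup_pyRange_one 1 100
  have hpos : ∀ y ∈ PySem.List.pyRange 1 100 1, 0 < y := by
    intro y hy
    have := (PySem.List.mem_pyRange_one).mp hy
    omega
  rw [← filter_permsA il.length (PySem.List.pyRange 1 100 1) 100 hnd hpos]
  apply PySem.List.foldl_congr_mem'
  intro t ht acc
  have hmem := (List.mem_filter.mp ht).1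
  have hlen : t.length = il.length := (mem_permsA hmem).1
  simp only [score_eq t il hlen]
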